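-- pv_equiv track=rewrite | github.com/dp-web4/web4 | implementation/reference/society_metabolic_states.py | deterministic_shuffle
-- ===== SOURCE A (Python) =====
-- def deterministic_shuffle(items: list, seed: int) -> list:
--     """Deterministic shuffle based on seed — no randomness."""
--     result = list(items)
--     n = len(result)
--     for i in range(n - 1, 0, -1):
--         j = seed % (i + 1)
--         result[i], result[j] = result[j], result[i]
--         seed = (seed * 6364136223846793005 + 1442695040888963407) & 0xFFFFFFFFFFFFFFFF
--     return result
-- ===== SOURCE B (Python) =====
-- def deterministic_shuffle(items: list, seed: int) -> list:
--     """Deterministic shuffle based on seed -- no randomness.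
--
--     Selection form: instead of swapping inside a full-length array, pick the
--     element destined for each final slot (from the back) out of a shrinking
--     pool; the vacated last pool slot's element takes the picked one's place.
--     """
--     pool = list(items)
--     picked = []
--     for i in range(len(pool) - 1, 0, -1):
--         j = seed % (i + 1)
--         picked.append(pool[j])
--         pool[j] = pool[i]
--         pool.pop()
--         seed = (seed * 6364136223846793005 + 1442695040888963407) & 0xFFFFFFFFFFFFFFFF
--     picked.reverse()
--     return pool + picked
-- ===== Notes on version B (the rewrite author's own statement) =====
-- stated objective: alternative
-- what changed: B replaces A's in-place swap pass over a full-length array by a selection algorithm: it repeatedly picks the element destined for the current last slot out of a shrinking pool (moving the pool's last element into the vacated position), builds the picked elements back-to-front, and concatenates the leftover pool with them.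
import Mathlib
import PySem

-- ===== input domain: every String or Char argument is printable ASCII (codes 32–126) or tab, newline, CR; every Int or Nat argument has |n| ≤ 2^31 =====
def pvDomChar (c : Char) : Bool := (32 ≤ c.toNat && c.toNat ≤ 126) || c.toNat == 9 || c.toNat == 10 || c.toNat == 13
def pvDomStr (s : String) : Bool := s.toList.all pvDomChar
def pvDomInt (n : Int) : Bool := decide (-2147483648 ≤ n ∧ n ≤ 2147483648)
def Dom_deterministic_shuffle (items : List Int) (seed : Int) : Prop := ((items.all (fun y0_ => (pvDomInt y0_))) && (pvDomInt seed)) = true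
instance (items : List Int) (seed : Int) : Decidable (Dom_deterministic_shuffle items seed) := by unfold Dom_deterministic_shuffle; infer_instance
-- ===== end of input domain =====

-- B replaces A's in-place swap pass by a selection algorithm over a shrinking pool,
-- building the picked elements back-to-front (objective: alternative); same cost, same output.

-- ===== PORT A =====
-- result[i], result[j] = result[j], result[i]  (indices here always satisfy 0 ≤ j ≤ i < n)
def pySwap (l : List Int) (i j : Int) : List Int :=
  (l.set i.toNat (l.getD j.toNat 0)).set j.toNat (l.getD i.toNat 0)

-- one iteration of A's loop body: swap, then advance the LCG ('& 0xFFFF…F' = mod 2^64,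
-- exact for negative values too since Python's & with the all-ones mask is floor mod)
def stepA (st : List Int × Int) (i : Int) : List Int × Int :=
  let j := PySem.Int.mod st.2 (i + 1)
  (pySwap st.1 i j,
   PySem.Int.mod (st.2 * 6364136223846793005 + 1442695040888963407) 18446744073709551616)

def deterministic_shuffle (items : List Int) (seed : Int) : List Int :=
  let n : Int := items.length
  ((PySem.List.pyRange (n - 1) 0 (-1)).foldl stepA (items, seed)).1

-- ===== PORT B =====
-- loop body: append pool[j] to picked, move pool's last element pool[i] into slot j,
-- pool.pop() (the pool is nonempty whenever the loop runs, so pop = dropLast), advance the LCG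
def stepB (st : (List Int × List Int) × Int) (i : Int) : (List Int × List Int) × Int :=
  let pool := st.1.1
  let j := PySem.Int.mod st.2 (i + 1)
  (((pool.set j.toNat (pool.getD i.toNat 0)).dropLast,
    st.1.2 ++ [pool.getD j.toNat 0]),
   PySem.Int.mod (st.2 * 6364136223846793005 + 1442695040888963407) 18446744073709551616)

def deterministic_shuffle_alt (items : List Int) (seed : Int) : List Int :=
  let n : Int := items.length
  let r := (PySem.List.pyRange (n - 1) 0 (-1)).foldl stepB ((items, []), seed)
  r.1.1 ++ r.1.2.reverse

-- ===== PRECONDITION & SPEC =====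
def Spec_deterministic_shuffle (items : List Int) (seed : Int) (out : List Int) : Prop := out = deterministic_shuffle_alt items seed
instance (items : List Int) (seed : Int) (out : List Int) : Decidable (Spec_deterministic_shuffle items seed out) := by unfold Spec_deterministic_shuffle; infer_instance

-- ===== CLAIM (what is proved, stated in full; the proofs are below) =====
def Claim_equal_deterministic_shuffle : Prop := ∀ (items : List Int) (seed : Int), Dom_deterministic_shuffle items seed → Spec_deterministic_shuffle items seed (deterministic_shuffle items seed)

-- ===== LEMMAS AND PROOFS =====

-- the list identity behind one step: swapping positions i+1 (the last) and j ≤ i+1 of pool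
-- equals (move the last element into slot j, drop the last slot) ++ [pool[j]]
lemma swap_eq_pick (pool : List Int) (i : Nat) (j : Int)
    (hlen : pool.length = i + 2) :
    pySwap pool ((i : Int) + 1) j
      = (pool.set j.toNat (pool.getD ((i:Int)+1).toNat 0)).dropLast ++ [pool.getD j.toNat 0] := by
  have hii : ((i:Int)+1).toNat = i + 1 := by omega
  unfold pySwap
  rw [hii]
  have key : ∀ (pj pi : Int), (j.toNat = i + 1 → pj = pi) →
      (pool.set (i+1) pj).set j.toNat pi
        = (pool.set j.toNat pi).dropLast ++ [pj] := by
    intro pj pi hpe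
    apply List.ext_getElem
    · simp [hlen]
    · intro k hk1 hk2
      have hk : k < i + 2 := by simpa [hlen] using hk1
      rcases Nat.lt_or_ge k (i+1) with hlt | hge
      · have hk' : k < ((pool.set j.toNat pi).dropLast).length := by
          simp [hlen]; omega
        rw [List.getElem_append_left hk', List.getElem_dropLast]
        simp only [List.getElem_set]
        by_cases hje : j.toNat = k
        · simp [hje]
        · have hne : ¬ (i + 1 = k) := by omega
          simp [hje, hne]
      · have hk' : k = i + 1 := by omega
        subst hk'
        have hlenD : ((pool.set j.toNat pi).dropLast).length = i + 1 := by simp [hlen]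
        rw [List.getElem_append_right (by omega)]
        simp only [List.getElem_set, hlenD, Nat.sub_self, List.getElem_singleton]
        by_cases hje : j.toNat = i + 1
        · simp [hje, hpe hje]
        · simp [hje]
  apply key
  intro hje
  rw [hje]
-- pySwap acts only on the first block when both indices fall inside it
lemma pySwap_append (pool tail : List Int) (a b : Int)
    (ha : a.toNat < pool.length) (hb : b.toNat < pool.length) :
    pySwap (pool ++ tail) a b = pySwap pool a b ++ tail := by
  unfold pySwap
  rw [List.getD_append _ _ _ _ hb, List.getD_append _ _ _ _ ha,
      List.set_append_left _ _ ha, List.set_append_left _ _ (by simpa using hb)]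

-- main invariant: over the countdown range [i, i-1, …, 1], A's fold on (pool ++ picked.reverse)
-- equals B's fold state's pool ++ picked.reverse, when pool.length = i+1
lemma fold_eq (i : Nat) :
    ∀ (pool picked : List Int) (s : Int), pool.length = i + 1 →
    ((PySem.List.pyRange (i : Int) 0 (-1)).foldl stepA (pool ++ picked.reverse, s)).1
      = (let r := (PySem.List.pyRange (i : Int) 0 (-1)).foldl stepB ((pool, picked), s);
         r.1.1 ++ r.1.2.reverse) := by
  induction i with
  | zero =>
    intro pool picked s hlen
    simp only [Nat.cast_zero]
    rw [PySem.List.pyRange_neg_one_eq_nil le_rfl]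
    simp
  | succ i ih =>
    intro pool picked s hlen
    have hcast : ((i+1 : Nat) : Int) = (i : Int) + 1 := by push_cast; ring
    rw [hcast, PySem.List.pyRange_neg_one_cons (by positivity)]
    simp only [List.foldl_cons]
    set j := PySem.Int.mod s ((i:Int) + 1 + 1) with hjdef
    have hj0 : 0 ≤ j := PySem.Int.mod_nonneg _ (by positivity)
    have hjlt : j < (i:Int) + 2 := by
      have := PySem.Int.mod_lt s (b := (i:Int) + 1 + 1) (by positivity)
      omega
    have hjle : j.toNat ≤ i + 1 := by omega
    have hA : stepA (pool ++ picked.reverse, s) ((i:Int)+1)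
        = ((pool.set j.toNat (pool.getD ((i:Int)+1).toNat 0)).dropLast
            ++ (picked ++ [pool.getD j.toNat 0]).reverse,
           PySem.Int.mod (s * 6364136223846793005 + 1442695040888963407) 18446744073709551616) := by
      simp only [stepA, ← hjdef]
      rw [pySwap_append pool picked.reverse _ _ (by omega) (by omega),
          swap_eq_pick pool i j hlen]
      simp
    rw [hA]
    have hB : stepB ((pool, picked), s) ((i:Int)+1)
        = (((pool.set j.toNat (pool.getD ((i:Int)+1).toNat 0)).dropLast,
            picked ++ [pool.getD j.toNat 0]),
           PySem.Int.mod (s * 6364136223846793005 + 1442695040888963407) 18446744073709551616) := rfl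
    rw [hB, show (i:Int) + 1 - 1 = (i:Int) by ring]
    refine ih _ _ _ ?_
    simp only [List.length_dropLast, List.length_set, hlen]
    omega

-- ===== VERDICT (by name: the statement is the Claim_ definition above) =====
theorem deterministic_shuffle_spec : Claim_equal_deterministic_shuffle := by
  intro items seed _
  unfold Spec_deterministic_shuffle deterministic_shuffle deterministic_shuffle_alt
  rcases items with _ | ⟨x, xs⟩
  · simp [PySem.List.pyRange]
  · have := fold_eq xs.length (x :: xs) [] seed (by simp)
    have hc : ((x :: xs).length : Int) - 1 = (xs.length : Int) := by simp
    simpa [hc] using this
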